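-- pv_equiv track=rewrite | github.com/Jieun-Song/CodingTest | silver/2057.py | can_represent_as_factorial_sum
-- ===== SOURCE A (Python) =====
-- def factorial_upto_n(n):
--     """n 이하의 모든 팩토리얼 값을 계산"""
--     factorials = []
--     fact = 1
--     i = 1
--     while fact <= n:
--         factorials.append(fact)
--         fact *= i
--         i += 1
--     return factorials[::-1]  # 큰 값부터 작은 값으로 반환
--
-- def can_represent_as_factorial_sum(n):
--     """n을 서로 다른 정수의 팩토리얼 합으로 나타낼 수 있는지 확인"""
--     if n == 0:
--         return True
--
--     factorials = factorial_upto_n(n)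
--     for fact in factorials:
--         if n >= fact:
--             n -= fact
--
--     return n == 0
-- ===== SOURCE B (Python) =====
-- def can_represent_as_factorial_sum(n):
--     """DP over reachable subset sums of the factorials <= n (no greedy pass)."""
--     reach = {0}
--     fact = 1
--     i = 1
--     while fact <= n:
--         reach |= {r + fact for r in reach}
--         fact *= i
--         i += 1
--     return n in reach
-- ===== Notes on version B (the rewrite author's own statement) =====
-- stated objective: alternative
-- what changed: Replaces building the reversed factorial list plus a greedy subtraction pass by a single fused loop that maintains the set of all subset sums of the factorials generated so far and finally tests membership of n; correctness no longer relies on the super-increasing structure that makes greedy work.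
import Mathlib
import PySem

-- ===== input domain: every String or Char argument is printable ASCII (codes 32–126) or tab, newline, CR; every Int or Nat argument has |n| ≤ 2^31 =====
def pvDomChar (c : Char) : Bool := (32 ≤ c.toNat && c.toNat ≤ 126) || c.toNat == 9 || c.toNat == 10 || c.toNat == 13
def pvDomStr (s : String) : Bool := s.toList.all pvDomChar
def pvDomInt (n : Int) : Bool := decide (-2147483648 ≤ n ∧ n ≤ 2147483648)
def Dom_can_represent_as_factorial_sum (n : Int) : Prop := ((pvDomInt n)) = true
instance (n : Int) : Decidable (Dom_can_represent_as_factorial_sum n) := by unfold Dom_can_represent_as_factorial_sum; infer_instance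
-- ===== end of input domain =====

-- B replaces the greedy subtraction over the reversed factorial list by a fused loop
-- maintaining the set of reachable subset sums of the factorials (alternative algorithm, not faster).


-- ===== PORT A =====
-- the while-loop of factorial_upto_n; fuel only makes it total (64 ≫ the ≤ 14
-- iterations possible for |n| ≤ 2^31; the guard and state updates are the Python's)
def pvFactsAux (n : Int) (fuel : Nat) (fact i : Int) (acc : List Int) : List Int :=
  match fuel with
  | 0 => acc
  | fuel' + 1 =>
    if fact ≤ n then pvFactsAux n fuel' (fact * i) (i + 1) (acc ++ [fact]) else acc

def factorial_upto_n (n : Int) : List Int :=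
  (pvFactsAux n 64 1 1 []).reverse  -- factorials[::-1] is List.reverse (exact)

def can_represent_as_factorial_sum (n : Int) : Bool :=
  if n == 0 then true
  else -- the for-loop 'if n >= fact: n -= fact' as a foldl over the list, then 'return n == 0'
    ((factorial_upto_n n).foldl (fun m fact => if fact ≤ m then m - fact else m) n) == 0

-- ===== PORT B =====
-- Source B's single while-loop: same fuel-totalised loop shape, state (fact, i, reach);
-- reach |= {r + fact for r in reach} is Set.union with the shifted copies
def pvReachAux (n : Int) (fuel : Nat) (fact i : Int) (reach : PySem.Set Int) : PySem.Set Int :=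
  match fuel with
  | 0 => reach
  | fuel' + 1 =>
    if fact ≤ n then
      pvReachAux n fuel' (fact * i) (i + 1)
        (PySem.Set.union reach (reach.map (fun r => r + fact)))
    else reach

def can_represent_as_factorial_sum_alt (n : Int) : Bool :=
  PySem.Set.contains (pvReachAux n 64 1 1 (PySem.Set.ofList [0])) n

-- ===== PRECONDITION & SPEC =====
def Spec_can_represent_as_factorial_sum (n : Int) (out : Bool) : Prop := out = can_represent_as_factorial_sum_alt n
instance (n : Int) (out : Bool) : Decidable (Spec_can_represent_as_factorial_sum n out) := by unfold Spec_can_represent_as_factorial_sum; infer_instance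

-- ===== CLAIM (what is proved, stated in full; the proofs are below) =====
def Claim_equal_can_represent_as_factorial_sum : Prop := ∀ (n : Int), Dom_can_represent_as_factorial_sum n → Spec_can_represent_as_factorial_sum n (can_represent_as_factorial_sum n)

-- ===== LEMMAS AND PROOFS =====

-- the descending-list property that makes greedy complete:
-- head ≥ 1 and head ≥ sum of the tail, hereditarily
def pvGood : List Int → Prop
  | [] => True
  | f :: r => 1 ≤ f ∧ r.sum ≤ f ∧ pvGood r

theorem pvGood_pos : ∀ (l : List Int), pvGood l → ∀ x ∈ l, 1 ≤ x := by
  intro l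
  induction l with
  | nil => intro _ x hx; cases hx
  | cons f r ih =>
    intro hg x hx
    rcases List.mem_cons.mp hx with rfl | hx
    · exact hg.1
    · exact ih hg.2.2 x hx

-- accumulator splitting for A's loop
theorem pvFactsAux_acc (n : Int) : ∀ (fuel : Nat) (fact i : Int) (acc : List Int),
    pvFactsAux n fuel fact i acc = acc ++ pvFactsAux n fuel fact i [] := by
  intro fuel
  induction fuel with
  | zero => intro fact i acc; simp [pvFactsAux]
  | succ fuel' ih =>
    intro fact i acc
    simp only [pvFactsAux]
    by_cases h : fact ≤ n
    · simp only [h, if_pos]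
      rw [ih (fact * i) (i + 1) (acc ++ [fact])]
      simp only [List.nil_append]
      rw [ih (fact * i) (i + 1) [fact]]
      simp
    · simp [h]

-- the list A's loop produces is pvGood when reversed
theorem pvFactsAux_good (n : Int) : ∀ (fuel : Nat) (fact i : Int) (acc : List Int),
    1 ≤ fact → 1 ≤ i → acc.sum ≤ fact → (i = 1 → acc = []) → pvGood acc.reverse →
    pvGood ((pvFactsAux n fuel fact i acc).reverse) := by
  intro fuel
  induction fuel with
  | zero => intro fact i acc _ _ _ _ hgood; simpa [pvFactsAux] using hgood
  | succ fuel' ih =>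
    intro fact i acc hf hi hsum hone hgood
    simp only [pvFactsAux]
    by_cases h : fact ≤ n
    · simp only [h, if_pos]
      apply ih (fact * i) (i + 1) (acc ++ [fact])
      · nlinarith
      · omega
      · rcases eq_or_lt_of_le hi with hi1 | hi2
        · have : acc = [] := hone hi1.symm
          simp [this, ← hi1]
        · have h2 : (2:Int) ≤ i := hi2
          simp only [List.sum_append, List.sum_cons, List.sum_nil]
          nlinarith
      · intro hcontra; omega
      · show pvGood ((acc ++ [fact]).reverse)
        rw [List.reverse_append]
        simp only [List.reverse_singleton, List.singleton_append]
        exact ⟨hf, by simpa using hsum, hgood⟩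
    · simpa [h] using hgood

-- greedy over a pvGood (descending) list hits 0 exactly when some sublist sums to n
theorem pvGreedy_iff : ∀ (l : List Int), pvGood l → ∀ (n : Int),
    (l.foldl (fun m fact => if fact ≤ m then m - fact else m) n = 0 ↔
      ∃ s : List Int, s.Sublist l ∧ s.sum = n) := by
  intro l
  induction l with
  | nil =>
    intro _ n
    simp only [List.foldl_nil]
    constructor
    · rintro rfl; exact ⟨[], List.Sublist.refl _, rfl⟩
    · rintro ⟨s, hs, hsum⟩
      have := List.sublist_nil.mp hs
      subst this; simpa using hsum.symm
  | cons f r ih =>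
    rintro ⟨hf1, hrsum, hgood⟩ n
    have hrpos : ∀ x ∈ r, (1:Int) ≤ x := pvGood_pos r hgood
    have hrnn : ∀ x ∈ r, (0:Int) ≤ x := fun x hx => le_trans (by norm_num) (hrpos x hx)
    simp only [List.foldl_cons]
    by_cases h : f ≤ n
    · simp only [h, if_pos]
      rw [ih hgood (n - f)]
      constructor
      · rintro ⟨s, hs, hsum⟩
        exact ⟨f :: s, List.Sublist.cons₂ f hs, by simp [hsum]⟩
      · rintro ⟨t, ht, htsum⟩
        rcases List.sublist_cons_iff.mp ht with ht' | ⟨s, rfl, hs⟩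
        · -- t avoids f: then n ≤ r.sum ≤ f ≤ n, so n = f and [] works
          have h1 : t.sum ≤ r.sum := List.Sublist.sum_le_sum ht' hrnn
          have h2 : n = f := by omega
          exact ⟨[], List.nil_sublist r, by simp [h2]⟩
        · exact ⟨s, hs, by simp at htsum; omega⟩
    · rw [if_neg h, ih hgood n]
      constructor
      · rintro ⟨s, hs, hsum⟩
        exact ⟨s, List.Sublist.cons f hs, hsum⟩
      · rintro ⟨t, ht, htsum⟩
        rcases List.sublist_cons_iff.mp ht with ht' | ⟨s, rfl, hs⟩
        · exact ⟨t, ht', htsum⟩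
        · exfalso
          have hnn : (0:Int) ≤ s.sum :=
            List.sum_nonneg (fun x hx => hrnn x (hs.subset hx))
          simp only [List.sum_cons] at htsum
          omega

-- B's reach set is exactly {y + Σs : y ∈ S, s sublist of the factorials still to come}
theorem pvReachAux_mem : ∀ (fuel : Nat) (n fact i : Int) (S : PySem.Set Int) (x : Int),
    x ∈ pvReachAux n fuel fact i S ↔
      ∃ s : List Int, s.Sublist (pvFactsAux n fuel fact i []) ∧ ∃ y ∈ S, y + s.sum = x := by
  intro fuel
  induction fuel with
  | zero =>
    intro n fact i S x
    simp only [pvReachAux, pvFactsAux]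
    constructor
    · intro hx; exact ⟨[], List.Sublist.refl _, x, hx, by simp⟩
    · rintro ⟨s, hs, y, hy, hsum⟩
      have := List.sublist_nil.mp hs
      subst this; simp at hsum; rwa [← hsum]
  | succ fuel' ih =>
    intro n fact i S x
    simp only [pvReachAux, pvFactsAux]
    by_cases h : fact ≤ n
    · simp only [h, if_pos]
      rw [ih n (fact * i) (i + 1) _ x]
      simp only [List.nil_append]
      rw [pvFactsAux_acc n fuel' (fact * i) (i + 1) [fact]]
      constructor
      · rintro ⟨s, hs, y, hy, hsum⟩
        rcases (PySem.Set.mem_union _ _ _).mp hy with hyS | hymap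
        · exact ⟨s, List.Sublist.cons fact hs, y, hyS, hsum⟩
        · rcases List.mem_map.mp hymap with ⟨z, hz, rfl⟩
          exact ⟨fact :: s, List.Sublist.cons₂ fact hs, z, hz, by simp at hsum ⊢; omega⟩
      · rintro ⟨t, ht, y, hy, hsum⟩
        rcases List.sublist_cons_iff.mp ht with ht' | ⟨s, rfl, hs⟩
        · exact ⟨t, ht', y, (PySem.Set.mem_union _ _ _).mpr (Or.inl hy), hsum⟩
        · refine ⟨s, hs, y + fact, (PySem.Set.mem_union _ _ _).mpr (Or.inr ?_), ?_⟩
          · exact List.mem_map.mpr ⟨y, hy, rfl⟩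
          · simp at hsum ⊢; omega
    · simp only [if_neg h]
      constructor
      · intro hx; exact ⟨[], List.Sublist.refl _, x, hx, by simp⟩
      · rintro ⟨s, hs, y, hy, hsum⟩
        have := List.sublist_nil.mp hs
        subst this; simp at hsum; rwa [← hsum]

-- sublists of l and of l.reverse realise the same sums
theorem pvSublist_sum_reverse (l : List Int) (n : Int) :
    (∃ s : List Int, s.Sublist l ∧ s.sum = n) ↔ (∃ t : List Int, t.Sublist l.reverse ∧ t.sum = n) := by
  constructor
  · rintro ⟨s, hs, rfl⟩
    exact ⟨s.reverse, List.reverse_sublist.mpr hs, by simp⟩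
  · rintro ⟨t, ht, rfl⟩
    refine ⟨t.reverse, ?_, by simp⟩
    have := List.reverse_sublist.mpr ht
    simpa using this

-- ===== VERDICT (by name: the statement is the Claim_ definition above) =====
theorem can_represent_as_factorial_sum_spec : Claim_equal_can_represent_as_factorial_sum := by
  unfold Claim_equal_can_represent_as_factorial_sum
  intro n _
  unfold Spec_can_represent_as_factorial_sum
  apply Bool.coe_iff_coe.mp
  have hgood : pvGood ((pvFactsAux n 64 1 1 []).reverse) :=
    pvFactsAux_good n 64 1 1 [] (by norm_num) (by norm_num) (by simp) (fun _ => rfl)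
      (by simp [pvGood])
  have hB : can_represent_as_factorial_sum_alt n = true ↔
      ∃ s : List Int, s.Sublist (pvFactsAux n 64 1 1 []) ∧ s.sum = n := by
    unfold can_represent_as_factorial_sum_alt
    rw [PySem.Set.contains_iff, pvReachAux_mem]
    constructor
    · rintro ⟨s, hs, y, hy, hsum⟩
      have h0 : (PySem.Set.ofList [(0:Int)] : List Int) = [0] := rfl
      rw [h0] at hy
      have : y = 0 := by simpa using hy
      exact ⟨s, hs, by omega⟩
    · rintro ⟨s, hs, hsum⟩
      refine ⟨s, hs, 0, ?_, by omega⟩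
      show (0:Int) ∈ (PySem.Set.ofList [(0:Int)] : List Int)
      simp [show (PySem.Set.ofList [(0:Int)] : List Int) = [0] from rfl]
  have hA : can_represent_as_factorial_sum n = true ↔
      ∃ s : List Int, s.Sublist (pvFactsAux n 64 1 1 []) ∧ s.sum = n := by
    unfold can_represent_as_factorial_sum factorial_upto_n
    by_cases h0 : n = 0
    · rw [if_pos (by simpa using h0)]
      subst h0
      constructor
      · intro _; exact ⟨[], List.nil_sublist _, by simp⟩
      · intro _; rfl
    · rw [if_neg (by simpa using h0)]
      simp only [beq_iff_eq]
      rw [pvGreedy_iff _ hgood n, ← pvSublist_sum_reverse]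
  rw [hA, hB]
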